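-- pv_equiv track=rewrite | github.com/antenore/voynich-toolkit | src/voynich_toolkit/split_gallows_semantic_test.py | _extract_context_words
-- ===== SOURCE A (Python) =====
-- def _extract_context_words(line_words: list[str], target_idx: int,
--                            window: int = 3) -> list[str]:
--     """Extract ±window words around target_idx (excluding target)."""
--     ctx = []
--     for i in range(max(0, target_idx - window),
--                    min(len(line_words), target_idx + window + 1)):
--         if i != target_idx:
--             ctx.append(line_words[i])
--     return ctx
-- ===== SOURCE B (Python) =====
-- def _extract_context_words(line_words: list[str], target_idx: int,
--                            window: int = 3) -> list[str]:
--     """Extract +/-window words around target_idx (excluding target)."""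
--     return [w for i, w in enumerate(line_words)
--             if target_idx - window <= i <= target_idx + window and i != target_idx]
-- ===== Notes on version B (the rewrite author's own statement) =====
-- stated objective: alternative
-- what changed: Replaces A's index loop over a clamped range(max(0,t-w), min(len,t+w+1)) by a single filtering pass over enumerate(line_words), keeping each word whose index lies within the window and is not the target; no index arithmetic with clamping, no list indexing.
import Mathlib
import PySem

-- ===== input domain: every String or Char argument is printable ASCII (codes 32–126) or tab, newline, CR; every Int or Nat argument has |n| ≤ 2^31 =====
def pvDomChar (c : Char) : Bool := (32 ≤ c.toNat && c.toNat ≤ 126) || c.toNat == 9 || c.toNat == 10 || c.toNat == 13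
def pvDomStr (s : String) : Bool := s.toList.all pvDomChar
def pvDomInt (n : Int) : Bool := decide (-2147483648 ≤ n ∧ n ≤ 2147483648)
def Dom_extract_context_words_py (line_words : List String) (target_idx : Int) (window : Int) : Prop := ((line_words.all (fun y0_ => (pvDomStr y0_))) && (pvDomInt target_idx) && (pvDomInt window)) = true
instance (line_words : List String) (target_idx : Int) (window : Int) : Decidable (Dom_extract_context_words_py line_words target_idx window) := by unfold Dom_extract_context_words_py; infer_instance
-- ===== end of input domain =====

-- B replaces A's clamped index loop by one filtering pass over enumerate(line_words),
-- keeping each word whose index is within the window and not the target (alternative).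

-- ===== PORT A =====
-- for i in range(max(0, ti - w), min(len(lw), ti + w + 1)): if i != ti: ctx.append(lw[i])
def extract_context_words_py (line_words : List String) (target_idx : Int) (window : Int) : List String :=
  (PySem.List.pyRange (max 0 (target_idx - window))
      (min (line_words.length : Int) (target_idx + window + 1)) 1).foldl
    (fun ctx i => if i ≠ target_idx then ctx ++ [PySem.List.pyGetD line_words i ""] else ctx) []

-- ===== PORT B =====
-- [w for i, w in enumerate(lw) if ti - win <= i <= ti + win and i != ti]
def extract_context_words_py_alt (line_words : List String) (target_idx : Int) (window : Int) : List String :=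
  ((PySem.List.enumerate line_words 0).filter
    (fun p => decide (target_idx - window ≤ p.1 ∧ p.1 ≤ target_idx + window ∧ p.1 ≠ target_idx))).map (·.2)

-- ===== PRECONDITION & SPEC =====
def Spec_extract_context_words_py (line_words : List String) (target_idx : Int) (window : Int) (out : List String) : Prop := out = extract_context_words_py_alt line_words target_idx window
instance (line_words : List String) (target_idx : Int) (window : Int) (out : List String) : Decidable (Spec_extract_context_words_py line_words target_idx window out) := by unfold Spec_extract_context_words_py; infer_instance

-- ===== CLAIM (what is proved, stated in full; the proofs are below) =====
def Claim_equal_extract_context_words_py : Prop := ∀ (line_words : List String) (target_idx : Int) (window : Int), Dom_extract_context_words_py line_words target_idx window → Spec_extract_context_words_py line_words target_idx window (extract_context_words_py line_words target_idx window)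

-- ===== LEMMAS AND PROOFS =====

-- the two filtered index lists coincide
theorem pv_filter_ranges (len ti w : Int) (hlen : 0 ≤ len) :
    (PySem.List.pyRange (max 0 (ti - w)) (min len (ti + w + 1)) 1).filter
        (fun i => decide (i ≠ ti))
      = (PySem.List.pyRange 0 len 1).filter
        (fun j => decide (ti - w ≤ j ∧ j ≤ ti + w ∧ j ≠ ti)) := by
  set lo : Int := max 0 (ti - w) with hlo
  set hi : Int := min len (ti + w + 1) with hhi
  by_cases hle : hi ≤ lo
  · rw [PySem.List.pyRange_one_eq_nil hle, List.filter_nil]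
    symm
    rw [List.filter_eq_nil_iff]
    intro j hj
    have := (PySem.List.mem_pyRange_one).1 hj
    simp only [decide_eq_true_eq, not_and, not_not]
    omega
  · push Not at hle
    have h0 : (0 : Int) ≤ lo := by omega
    have h1 : lo ≤ hi := le_of_lt hle
    have h2 : hi ≤ len := by omega
    rw [PySem.List.pyRange_one_append 0 lo len h0 (by omega),
        PySem.List.pyRange_one_append lo hi len h1 h2,
        List.filter_append, List.filter_append]
    have hL : (PySem.List.pyRange 0 lo 1).filter
        (fun j => decide (ti - w ≤ j ∧ j ≤ ti + w ∧ j ≠ ti)) = [] := by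
      rw [List.filter_eq_nil_iff]
      intro j hj
      have := (PySem.List.mem_pyRange_one).1 hj
      simp only [decide_eq_true_eq, not_and, not_not]
      omega
    have hR : (PySem.List.pyRange hi len 1).filter
        (fun j => decide (ti - w ≤ j ∧ j ≤ ti + w ∧ j ≠ ti)) = [] := by
      rw [List.filter_eq_nil_iff]
      intro j hj
      have := (PySem.List.mem_pyRange_one).1 hj
      simp only [decide_eq_true_eq, not_and, not_not]
      omega
    have hM : (PySem.List.pyRange lo hi 1).filter
        (fun j => decide (ti - w ≤ j ∧ j ≤ ti + w ∧ j ≠ ti))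
        = (PySem.List.pyRange lo hi 1).filter (fun i => decide (i ≠ ti)) := by
      apply List.filter_congr
      intro x hx
      have := (PySem.List.mem_pyRange_one).1 hx
      apply decide_eq_decide.mpr
      constructor
      · rintro ⟨_, _, h⟩; exact h
      · intro h; exact ⟨by omega, by omega, h⟩
    rw [hL, hR, hM, List.nil_append, List.append_nil]

-- ===== VERDICT (by name: the statement is the Claim_ definition above) =====
theorem extract_context_words_py_spec : Claim_equal_extract_context_words_py := by
  intro lw ti w _
  unfold Spec_extract_context_words_py extract_context_words_py extract_context_words_py_alt
  rw [PySem.List.foldl_append_ite (fun i => i ≠ ti)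
        (fun i => PySem.List.pyGetD lw i ""), List.nil_append]
  rw [PySem.List.enumerate_eq_map_pyRange lw "", List.filter_map, List.map_map]
  rw [pv_filter_ranges (lw.length : Int) ti w (by positivity)]
  rfl
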